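-- pv_equiv track=rewrite | github.com/audriusspiridavicius/hackerrank-exercises | encryption/functions.py | get_encrypted_text
-- ===== SOURCE A (Python) =====
-- def get_encrypted_text(grid:list):
--
--     encrypted_text = []
--     for row_index in range(len(grid[0])):
--         wrd = ""
--         for index in range(len(grid)):
--             if row_index < len(grid[index]):
--                 wrd += grid[index][row_index]
--         encrypted_text.append(wrd)
--
--     return " ".join(encrypted_text)
-- ===== SOURCE B (Python) =====
-- def get_encrypted_text(grid: list):
--     # One row-major pass with per-column accumulators instead of re-indexing every row per column.
--     cols = [[] for _ in range(len(grid[0]))]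
--     for row in grid:
--         for j, ch in enumerate(row):
--             if j < len(cols):
--                 cols[j].append(ch)
--     return " ".join("".join(col) for col in cols)
-- ===== Notes on version B (the rewrite author's own statement) =====
-- stated objective: alternative
-- what changed: Replaces the column-major double indexing loop (re-scanning every row for each column index) with a single row-major pass that distributes each character into per-column list accumulators, joining them at the end.
import Mathlib
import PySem

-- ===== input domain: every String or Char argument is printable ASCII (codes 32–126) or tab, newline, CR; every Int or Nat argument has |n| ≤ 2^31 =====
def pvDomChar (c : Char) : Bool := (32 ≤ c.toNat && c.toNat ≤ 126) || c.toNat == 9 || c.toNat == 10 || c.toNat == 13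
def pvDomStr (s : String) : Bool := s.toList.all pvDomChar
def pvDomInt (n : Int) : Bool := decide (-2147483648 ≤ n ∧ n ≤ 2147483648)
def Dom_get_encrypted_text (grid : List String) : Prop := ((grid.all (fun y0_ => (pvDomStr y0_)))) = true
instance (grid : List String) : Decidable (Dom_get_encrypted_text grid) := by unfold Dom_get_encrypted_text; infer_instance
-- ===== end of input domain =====

-- B replaces A's column-major double indexing with a single row-major pass over the cells
-- that distributes each character into per-column accumulators (alternative decomposition).

-- ===== PORT A =====
-- Literal port of A: for each row_index in range(len(grid[0])), scan all rows and append
-- grid[index][row_index] when in range; join the column words with a space.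
def get_encrypted_text (grid : List String) : String :=
  let encrypted_text :=
    (PySem.List.pyRange 0 (PySem.Str.len (grid.headD ""))).foldl
      (fun acc row_index =>
        let wrd :=
          (PySem.List.pyRange 0 (PySem.List.len grid)).foldl
            (fun w index =>
              if row_index < PySem.Str.len (PySem.List.pyGetD grid index "") then
                w ++ (PySem.Str.pyGet? (PySem.List.pyGetD grid index "") row_index).toList
              else w)
            ([] : List Char)
        acc ++ [wrd])
      ([] : List (List Char))
  String.ofList (PySem.Chars.join [' '] encrypted_text)

-- ===== PORT B =====
-- port of Source B: cols[j].append(ch) for the j-th char of each row, when j < len(cols)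
def pvAddChar (cs : List (List Char)) (p : Int × Char) : List (List Char) :=
  if p.1 < PySem.List.len cs then
    PySem.List.pySetD cs p.1 (PySem.List.pyGetD cs p.1 [] ++ [p.2])
  else cs

def pvAddRow (cs : List (List Char)) (row : String) : List (List Char) :=
  (PySem.List.enumerate row.toList).foldl pvAddChar cs

def get_encrypted_text_alt (grid : List String) : String :=
  let cols :=
    grid.foldl pvAddRow
      ((PySem.List.pyRange 0 (PySem.Str.len (grid.headD ""))).map (fun _ => ([] : List Char)))
  String.ofList (PySem.Chars.join [' '] cols)

-- ===== PRECONDITION & SPEC =====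
-- Pre_ excludes only the empty grid, on which A's grid[0] (and B's len(grid[0])) raise IndexError.
def Pre_get_encrypted_text (grid : List String) : Prop := grid ≠ []
instance (grid : List String) : Decidable (Pre_get_encrypted_text grid) := by
  unfold Pre_get_encrypted_text; infer_instance

def pvWitness_get_encrypted_text : List String := ["abc", "de"]

def Spec_get_encrypted_text (grid : List String) (out : String) : Prop := out = get_encrypted_text_alt grid
instance (grid : List String) (out : String) : Decidable (Spec_get_encrypted_text grid out) := by
  unfold Spec_get_encrypted_text; infer_instance

-- ===== CLAIM (what is proved, stated in full; the proofs are below) =====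
def Claim_equal_get_encrypted_text : Prop := ∀ (grid : List String), Dom_get_encrypted_text grid → Pre_get_encrypted_text grid → Spec_get_encrypted_text grid (get_encrypted_text grid)

-- ===== LEMMAS AND PROOFS =====

-- the j-th column of the grid, in row order
def pvCol (rows : List String) (j : Nat) : List Char :=
  rows.flatMap (fun row => (row.toList[j]?).toList)

lemma pvA_char (row : String) (j : Nat) (w : List Char) :
    (if (j : Int) < PySem.Str.len row then w ++ (PySem.Str.pyGet? row (j : Int)).toList else w)
      = w ++ (row.toList[j]?).toList := by
  rw [PySem.Str.len_eq]
  by_cases h : j < row.toList.length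
  · rw [if_pos (by exact_mod_cast h)]
    simp
  · rw [if_neg (by exact_mod_cast h)]
    simp [List.getElem?_eq_none (show row.toList.length ≤ j by omega)]

lemma pvA_norm (grid : List String) :
    get_encrypted_text grid
      = String.ofList (PySem.Chars.join [' ']
          ((List.range (grid.headD "").toList.length).map (pvCol grid))) := by
  unfold get_encrypted_text
  rw [PySem.List.foldl_append_singleton_eq_map, PySem.Str.len_eq,
    PySem.List.pyRange_one 0 ((grid.headD "").toList.length : Int)]
  simp only [Int.sub_zero, Int.toNat_natCast, List.map_map, List.nil_append]
  congr 2
  refine List.map_congr_left (fun k _ => ?_)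
  simp only [Function.comp_apply, Int.zero_add]
  rw [PySem.List.foldl_pyRange_zero_pyGetD grid ""
      (fun w row => if (k : Int) < PySem.Str.len row then w ++ (PySem.Str.pyGet? row (k : Int)).toList else w)]
  rw [show (fun (w : List Char) (row : String) =>
        if (k : Int) < PySem.Str.len row then w ++ (PySem.Str.pyGet? row (k : Int)).toList else w)
      = (fun w row => w ++ (row.toList[k]?).toList) from
    funext fun w => funext fun row => pvA_char row k w]
  rw [PySem.List.foldl_append_eq_flatMap]
  simp [pvCol]

lemma pv_map_range_set {α : Type} (n s : Nat) (f : Nat → α) (v : α) (_hs : s < n) :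
    ((List.range n).map f).set s v = (List.range n).map (fun j => if j = s then v else f j) := by
  apply List.ext_getElem
  · simp
  · intro i h1 h2
    simp only [List.length_set, List.length_map, List.length_range] at h1
    simp only [List.getElem_set, List.getElem_map, List.getElem_range]
    by_cases hi : i = s
    · simp [hi]
    · simp [hi, show ¬ s = i from fun h => hi h.symm]

lemma pvAddRow_aux (row : List Char) :
    ∀ (n s : Nat) (f : Nat → List Char),
      (PySem.List.enumerate row (s : Int)).foldl pvAddChar ((List.range n).map f)
        = (List.range n).map (fun j => f j ++ (if s ≤ j then (row[j - s]?).toList else [])) := by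
  induction row with
  | nil =>
      intro n s f
      simp [PySem.List.enumerate]
  | cons ch rest ih =>
      intro n s f
      rw [PySem.List.enumerate_cons]
      simp only [List.foldl_cons]
      have hlen : PySem.List.len ((List.range n).map f) = (n : Int) := by
        simp [PySem.List.len_eq]
      by_cases hs : s < n
      · have hstep : pvAddChar ((List.range n).map f) ((s : Int), ch)
            = (List.range n).map (fun j => if j = s then f s ++ [ch] else f j) := by
          unfold pvAddChar
          rw [hlen]
          simp only [show ((s:Int) < (n:Int)) = True by simp; omega, if_true]
          rw [PySem.List.pySetD_natCast, PySem.List.pyGetD_natCast]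
          rw [show ((List.range n).map f).getD s [] = f s by
            rw [List.getD_eq_getElem _ _ (by simp [hs])]; simp]
          exact pv_map_range_set n s f (f s ++ [ch]) hs
        rw [hstep, show ((s : Int) + 1) = (((s + 1 : Nat)) : Int) by push_cast; ring, ih n (s + 1)]
        refine List.map_congr_left (fun j hj => ?_)
        by_cases hjs : j = s
        · subst hjs
          simp [show ¬ (j + 1 ≤ j) by omega]
        · by_cases hle : s ≤ j
          · have h1 : s + 1 ≤ j := by omega
            have h2 : j - s = (j - (s + 1)) + 1 := by omega
            simp [hjs, hle, h1, h2]
          · simp [hjs, hle, show ¬ (s + 1 ≤ j) by omega]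
      · have hstep : pvAddChar ((List.range n).map f) ((s : Int), ch) = (List.range n).map f := by
          unfold pvAddChar
          rw [hlen]
          simp [show ¬ ((s:Int) < (n:Int)) by omega]
        rw [hstep, show ((s : Int) + 1) = (((s + 1 : Nat)) : Int) by push_cast; ring, ih n (s + 1)]
        refine List.map_congr_left (fun j hj => ?_)
        simp only [List.mem_range] at hj
        simp [show ¬ (s ≤ j) by omega, show ¬ (s + 1 ≤ j) by omega]

lemma pvFoldl_addRow (rows : List String) :
    ∀ (n : Nat) (f : Nat → List Char),
      rows.foldl pvAddRow ((List.range n).map f)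
        = (List.range n).map (fun j => f j ++ pvCol rows j) := by
  induction rows with
  | nil => intro n f; simp [pvCol]
  | cons r rest ih =>
      intro n f
      simp only [List.foldl_cons]
      have h0 : pvAddRow ((List.range n).map f) r
          = (List.range n).map (fun j => f j ++ (r.toList[j]?).toList) := by
        unfold pvAddRow
        have := pvAddRow_aux r.toList n 0 f
        simpa using this
      rw [h0, ih]
      refine List.map_congr_left (fun j _ => ?_)
      simp [pvCol, List.flatMap_cons, List.append_assoc]

lemma pvB_norm (grid : List String) :
    get_encrypted_text_alt grid
      = String.ofList (PySem.Chars.join [' ']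
          ((List.range (grid.headD "").toList.length).map (pvCol grid))) := by
  unfold get_encrypted_text_alt
  rw [PySem.Str.len_eq, PySem.List.pyRange_one]
  simp only [Int.sub_zero, Int.toNat_natCast, List.map_map]
  rw [show ((fun _ => ([] : List Char)) ∘ fun k : Nat => (0 : Int) + ↑k) = (fun _ => ([] : List Char)) by rfl]
  rw [pvFoldl_addRow grid (grid.headD "").toList.length (fun _ => [])]
  simp

-- ===== VERDICT (by name: the statement is the Claim_ definition above) =====
theorem get_encrypted_text_spec : Claim_equal_get_encrypted_text := by
  intro grid _ _
  unfold Spec_get_encrypted_text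
  rw [pvA_norm, pvB_norm]
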